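-- pv_equiv track=rewrite | github.com/NoaBenDror/Introduction_To_Computer_Science | ex5/wordsearch.py | build_letter_to_indices
-- ===== SOURCE A (Python) =====
-- def build_letter_to_indices(matrix):
--     """a function that gets matrix of letters and returns a dictionary:
--      key = letter, value = list of row,column in which the letter appears"""
--     letter_to_indices = {}
--     for row in range(len(matrix)):
--         for col in range(len(matrix[0])):
--             letter = matrix[row][col]
--             if letter not in letter_to_indices:
--                 # add the letter to the dictionary, with empty list
--                 letter_to_indices[letter] = []
--             # add the index to the letter's list
--             letter_to_indices[letter].append((row, col))
--     return letter_to_indices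
-- ===== SOURCE B (Python) =====
-- def build_letter_to_indices(matrix):
--     """a function that gets matrix of letters and returns a dictionary:
--      key = letter, value = list of row,column in which the letter appears"""
--     width = len(matrix[0]) if matrix else 0
--     cells = [(matrix[r][c], (r, c)) for r in range(len(matrix)) for c in range(width)]
--     letters = list(dict.fromkeys(letter for letter, _ in cells))
--     return {letter: [pos for l, pos in cells if l == letter] for letter in letters}
-- ===== Notes on version B (the rewrite author's own statement) =====
-- stated objective: alternative
-- what changed: Replaces the interleaved single-pass dict bucketing with a flatten-then-group pipeline: the matrix is flattened once into (letter, position) cells, the distinct letters are extracted in first-appearance order, and each letter's bucket is built by a per-letter filter over the flat cell list.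
import Mathlib
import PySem

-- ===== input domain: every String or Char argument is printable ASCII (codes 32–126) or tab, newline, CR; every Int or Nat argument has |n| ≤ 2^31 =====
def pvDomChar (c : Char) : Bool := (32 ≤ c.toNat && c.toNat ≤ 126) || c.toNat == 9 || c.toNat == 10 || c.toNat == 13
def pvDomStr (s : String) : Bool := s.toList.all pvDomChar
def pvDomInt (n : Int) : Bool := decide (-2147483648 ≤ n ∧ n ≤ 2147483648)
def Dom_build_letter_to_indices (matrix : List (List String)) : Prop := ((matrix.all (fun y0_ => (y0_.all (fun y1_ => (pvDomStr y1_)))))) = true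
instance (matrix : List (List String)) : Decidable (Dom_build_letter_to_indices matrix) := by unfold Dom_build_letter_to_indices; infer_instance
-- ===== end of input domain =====

-- B replaces A's single-pass dict bucketing by a flatten / dedup / per-letter-filter pipeline (alternative decomposition, same results).

-- ===== PORT A =====
def build_letter_to_indices (matrix : List (List String)) : List (String × List (Int × Int)) :=
  ((PySem.List.pyRange 0 (matrix.length : Int) 1).foldl (fun d row =>
    (PySem.List.pyRange 0 (((PySem.List.pyGet? matrix 0).getD []).length : Int) 1).foldl (fun d col =>
      let letter := (PySem.List.pyGet? ((PySem.List.pyGet? matrix row).getD []) col).getD ""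
      let d' := if d.contains letter then d else d.insert letter ([] : List (Int × Int))
      d'.modify letter [] (fun l => l ++ [(row, col)])) d)
    (PySem.Dict.empty : PySem.Dict String (List (Int × Int)))).items

-- ===== PORT B =====
-- width = len(matrix[0]) if matrix else 0
def pvWidth (matrix : List (List String)) : Nat :=
  match matrix with
  | [] => 0
  | r :: _ => r.length

-- cells = [(matrix[r][c], (r, c)) for r in range(len(matrix)) for c in range(width)]
def pvCells (matrix : List (List String)) : List (String × (Int × Int)) :=
  (List.range matrix.length).flatMap (fun r =>
    (List.range (pvWidth matrix)).map (fun c =>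
      ((matrix.getD r []).getD c "", ((r : Int), (c : Int)))))

def build_letter_to_indices_alt (matrix : List (List String)) : List (String × List (Int × Int)) :=
  let cells := pvCells matrix
  let letters := PySem.List.dedup (cells.map (fun p => p.1))
  letters.map (fun letter => (letter, (cells.filter (fun p => p.1 == letter)).map (fun p => p.2)))

-- ===== PRECONDITION & SPEC =====
-- Pre_ excludes exactly the ragged matrices on which Python A raises IndexError: some row is
-- shorter than the first row, so matrix[row][col] fails for some col in range(len(matrix[0])).
def Pre_build_letter_to_indices (matrix : List (List String)) : Prop :=
  ∀ r ∈ matrix, (matrix.headD []).length ≤ r.length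
instance (matrix : List (List String)) : Decidable (Pre_build_letter_to_indices matrix) := by unfold Pre_build_letter_to_indices; infer_instance

def pvWitness_build_letter_to_indices : List (List String) := [["a", "b"], ["b", "a"]]

def Spec_build_letter_to_indices (matrix : List (List String)) (out : List (String × List (Int × Int))) : Prop := out = build_letter_to_indices_alt matrix
instance (matrix : List (List String)) (out : List (String × List (Int × Int))) : Decidable (Spec_build_letter_to_indices matrix out) := by unfold Spec_build_letter_to_indices; infer_instance

-- ===== CLAIM (what is proved, stated in full; the proofs are below) =====
def Claim_equal_build_letter_to_indices : Prop := ∀ (matrix : List (List String)), Dom_build_letter_to_indices matrix → Pre_build_letter_to_indices matrix → Spec_build_letter_to_indices matrix (build_letter_to_indices matrix)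

-- ===== LEMMAS AND PROOFS =====

-- A's "ensure key, then append" step is a single dict-modify step.
theorem pv_step_eq (d : PySem.Dict String (List (Int × Int))) (k : String) (pos : Int × Int) :
    (if d.contains k then d else d.insert k ([] : List (Int × Int))).modify k [] (fun l => l ++ [pos])
      = d.modify k [] (fun l => l ++ [pos]) := by
  by_cases h : d.contains k = true
  · simp [h]
  · rw [Bool.not_eq_true] at h
    simp only [h, Bool.false_eq_true, if_false, PySem.Dict.modify,
      PySem.Dict.getD_insert_self, PySem.Dict.getD_of_not_contains d _ h]
    apply PySem.Dict.ext
    rw [PySem.Dict.items_insert_of_contains _ _ (PySem.Dict.contains_insert_self d k []),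
      PySem.Dict.items_insert_of_not_contains d _ h,
      PySem.Dict.items_insert_of_not_contains d _ h]
    have hk : ∀ p ∈ d.items, (p.1 == k) = false := by
      intro p hp
      have : k ∉ d.keys := fun hm => by
        simp [(PySem.Dict.contains_iff_mem_keys d k).2 hm] at h
      simp only [beq_eq_false_iff_ne, ne_eq]
      exact fun he => this (he ▸ List.mem_map_of_mem hp)
    rw [List.map_append]
    congr 1
    · rw [List.map_congr_left (g := id) (fun p hp => by simp [hk p hp]), List.map_id]
    · simp

-- the inner range bound len(matrix[0]) is pvWidth matrix
theorem pv_inner_bound (matrix : List (List String)) :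
    ((PySem.List.pyGet? matrix 0).getD []).length = pvWidth matrix := by
  cases matrix <;> simp [PySem.List.pyGet?, PySem.List.pyIdx?, pvWidth]

-- A's nested loops build exactly the modify-fold over the flat cell list.
theorem pv_A_eq_fold (matrix : List (List String)) :
    build_letter_to_indices matrix =
      ((pvCells matrix).foldl (fun d p => d.modify p.1 [] (fun l => l ++ [p.2]))
        (PySem.Dict.empty : PySem.Dict String (List (Int × Int)))).items := by
  unfold build_letter_to_indices
  rw [pv_inner_bound]
  rw [PySem.List.pyRange_zero_natCast (pvWidth matrix)]
  rw [PySem.List.pyRange_zero_natCast matrix.length]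
  rw [List.foldl_map]
  congr 1
  rw [pvCells, List.foldl_flatMap]
  apply PySem.List.foldl_congr_mem
  intro acc r _
  rw [List.foldl_map, List.foldl_map]
  apply PySem.List.foldl_congr_mem
  intro d c _
  simp only [PySem.List.pyGet?_natCast, ← List.getD_eq_getElem?_getD]
  exact pv_step_eq d _ _

-- a dict with nodup keys is its keys paired with their values
theorem pv_items_eq_keys_map (d : PySem.Dict String (List (Int × Int))) (h : d.keys.Nodup) :
    d.items = d.keys.map (fun k => (k, d.getD k [])) := by
  unfold PySem.Dict.keys
  rw [List.map_map]
  symm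
  calc d.items.map ((fun k => (k, d.getD k [])) ∘ (fun p => p.1))
      = d.items.map id := by
        apply List.map_congr_left
        intro p hp
        have : d.getD p.1 [] = p.2 :=
          PySem.Dict.getD_of_mem_items d (by simpa using hp) h []
        simp [this]
    _ = d.items := List.map_id d.items

-- ===== VERDICT (by name: the statement is the Claim_ definition above) =====
theorem build_letter_to_indices_spec : Claim_equal_build_letter_to_indices := by
  intro matrix _ _
  unfold Spec_build_letter_to_indices build_letter_to_indices_alt
  rw [pv_A_eq_fold]
  have hnodup := PySem.Dict.nodup_keys_foldl_modify_key (pvCells matrix) (fun p => p.1) []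
    (fun _ p => fun l => l ++ [p.2]) (PySem.Dict.empty : PySem.Dict String (List (Int × Int)))
    (by simp [PySem.Dict.keys_empty])
  rw [pv_items_eq_keys_map _ hnodup]
  rw [PySem.Dict.keys_foldl_modify_key (pvCells matrix) (fun p => p.1) []
    (fun _ p => fun l => l ++ [p.2])]
  simp only [PySem.Dict.keys_empty, PySem.List.dedup_eq_ofList]
  apply List.map_congr_left
  intro k _
  rw [PySem.Dict.getD_foldl_modify_append, PySem.Dict.getD_empty]
  rfl
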